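-- pv_equiv track=rewrite | github.com/huypl53/python-practice | leetcode/289--Game-of-Life/main.py | calc_sum_neighbors
-- ===== SOURCE A (Python) =====
-- from typing import List
--
-- def calc_sum_neighbors(board: List[List[int]], i_c: int, j_c: int, w: int, h: int) -> int:
--     start_i = max(0, i_c - 1)
--     end_i = min(w, i_c + 2)
--     start_j = max(0, j_c - 1)
--     end_j = min(h, j_c + 2)
--     neighbor_sum = 0
--     for j in range(start_j, end_j):
--         for i in range(start_i, end_i):
--             neighbor_sum += board[j][i]
--     neighbor_sum -= board[j_c][i_c]
--     return neighbor_sum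
-- ===== SOURCE B (Python) =====
-- def calc_sum_neighbors(board, i_c, j_c, w, h):
--     total = 0
--     for j in range(len(board)):
--         if j_c - 1 <= j <= j_c + 1 and j < h:
--             row = board[j]
--             for i in range(len(row)):
--                 if i_c - 1 <= i <= i_c + 1 and i < w:
--                     total += row[i]
--     return total - board[j_c][i_c]
-- ===== Notes on version B (the rewrite author's own statement) =====
-- stated objective: alternative
-- what changed: B scans every cell of the board once with enumerate-style index loops and a window-membership filter (|j-j_c|<=1, j<h and likewise for i), instead of A's min/max-clamped 3x3 index ranges; the final center-cell subtraction is the same.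
import Mathlib
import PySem

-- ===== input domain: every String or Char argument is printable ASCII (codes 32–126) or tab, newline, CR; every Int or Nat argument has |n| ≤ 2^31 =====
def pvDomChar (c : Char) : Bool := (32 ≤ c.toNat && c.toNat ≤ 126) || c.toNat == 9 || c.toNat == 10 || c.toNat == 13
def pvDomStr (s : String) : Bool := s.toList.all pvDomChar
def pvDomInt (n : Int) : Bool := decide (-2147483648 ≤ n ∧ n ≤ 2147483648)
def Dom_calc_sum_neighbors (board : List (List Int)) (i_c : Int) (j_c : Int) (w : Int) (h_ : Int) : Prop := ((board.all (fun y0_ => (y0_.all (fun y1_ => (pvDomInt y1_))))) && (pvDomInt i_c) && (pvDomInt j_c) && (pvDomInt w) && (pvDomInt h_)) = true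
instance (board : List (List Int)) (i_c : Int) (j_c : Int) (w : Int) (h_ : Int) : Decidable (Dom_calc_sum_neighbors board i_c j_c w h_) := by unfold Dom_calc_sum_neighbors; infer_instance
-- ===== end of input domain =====

-- B scans the whole board with a window-membership filter on the indices instead of
-- A's clamped 3x3 index ranges; the final center-cell subtraction is the same.

-- board[j][i] (exact Python indexing wherever the access is in range)
def pvAt (board : List (List Int)) (j i : Int) : Int :=
  PySem.List.pyGetD (PySem.List.pyGetD board j ([] : List Int)) i 0

-- ===== PORT A =====
def calc_sum_neighbors (board : List (List Int)) (i_c : Int) (j_c : Int) (w : Int) (h_ : Int) : Int :=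
  let start_i := max 0 (i_c - 1)
  let end_i := min w (i_c + 2)
  let start_j := max 0 (j_c - 1)
  let end_j := min h_ (j_c + 2)
  let neighbor_sum : Int :=
    (PySem.List.pyRange start_j end_j 1).foldl
      (fun acc j =>
        (PySem.List.pyRange start_i end_i 1).foldl
          (fun acc2 i => acc2 + pvAt board j i) acc) 0
  neighbor_sum - pvAt board j_c i_c

-- ===== PORT B =====
def calc_sum_neighbors_alt (board : List (List Int)) (i_c : Int) (j_c : Int) (w : Int) (h_ : Int) : Int :=
  let total : Int :=
    (PySem.List.pyRange 0 (board.length : Int) 1).foldl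
      (fun total j =>
        if j_c - 1 ≤ j ∧ j ≤ j_c + 1 ∧ j < h_ then
          let row := PySem.List.pyGetD board j ([] : List Int)
          (PySem.List.pyRange 0 (row.length : Int) 1).foldl
            (fun t i =>
              if i_c - 1 ≤ i ∧ i ≤ i_c + 1 ∧ i < w then t + PySem.List.pyGetD row i 0
              else t)
            total
        else total)
      0
  total - pvAt board j_c i_c

-- ===== PRECONDITION & SPEC =====
-- Pre_ is exactly the set of inputs on which the Python A returns normally (no
-- IndexError): every window access board[j][i] is in range, and the final
-- board[j_c][i_c] (Python indexing, negative indices from the end) is in range.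
def Pre_calc_sum_neighbors (board : List (List Int)) (i_c : Int) (j_c : Int) (w : Int) (h_ : Int) : Prop :=
  (∀ j ∈ PySem.List.pyRange (max 0 (j_c - 1)) (min h_ (j_c + 2)) 1,
      j < (board.length : Int) ∧
      ∀ i ∈ PySem.List.pyRange (max 0 (i_c - 1)) (min w (i_c + 2)) 1,
        i < ((PySem.List.pyGetD board j ([] : List Int)).length : Int)) ∧
  PySem.Raise.InRange board.length j_c ∧
  PySem.Raise.InRange (PySem.List.pyGetD board j_c ([] : List Int)).length i_c
instance (board : List (List Int)) (i_c : Int) (j_c : Int) (w : Int) (h_ : Int) : Decidable (Pre_calc_sum_neighbors board i_c j_c w h_) := by unfold Pre_calc_sum_neighbors; infer_instance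

def pvWitness_calc_sum_neighbors : List (List Int) × Int × Int × Int × Int :=
  ([[1, 2], [3, 4]], 0, 1, 2, 2)

def Spec_calc_sum_neighbors (board : List (List Int)) (i_c : Int) (j_c : Int) (w : Int) (h_ : Int) (out : Int) : Prop := out = calc_sum_neighbors_alt board i_c j_c w h_
instance (board : List (List Int)) (i_c : Int) (j_c : Int) (w : Int) (h_ : Int) (out : Int) : Decidable (Spec_calc_sum_neighbors board i_c j_c w h_ out) := by unfold Spec_calc_sum_neighbors; infer_instance

-- ===== CLAIM (what is proved, stated in full; the proofs are below) =====
def Claim_equal_calc_sum_neighbors : Prop := ∀ (board : List (List Int)) (i_c : Int) (j_c : Int) (w : Int) (h_ : Int), Dom_calc_sum_neighbors board i_c j_c w h_ → Pre_calc_sum_neighbors board i_c j_c w h_ → Spec_calc_sum_neighbors board i_c j_c w h_ (calc_sum_neighbors board i_c j_c w h_)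

-- ===== LEMMAS AND PROOFS =====

theorem pv_range_nil (s e : Int) (h : e ≤ s) : PySem.List.pyRange s e 1 = [] :=
  PySem.List.pyRange_one_eq_nil h

-- a guarded accumulating fold is the start value plus a sum of guarded terms
theorem pv_foldl_add_if (P : Int → Prop) [DecidablePred P] (f : Int → Int)
    (l : List Int) (a : Int) :
    l.foldl (fun t x => if P x then t + f x else t) a
      = a + (l.map (fun x => if P x then f x else 0)).sum := by
  induction l generalizing a with
  | nil => simp
  | cons x xs ih =>
    simp only [List.foldl_cons, List.map_cons, List.sum_cons]
    by_cases h : P x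
    · rw [if_pos h, if_pos h, ih]
      ring
    · rw [if_neg h, if_neg h, ih]
      ring

-- summing an interval-guarded term over [0, n) is summing over the clipped interval
theorem pv_scan_interval (P : Int → Prop) [DecidablePred P] (g : Int → Int)
    (lo hi : Int) (hP : ∀ x, P x ↔ (lo ≤ x ∧ x < hi)) (n : Nat) :
    ((PySem.List.pyRange 0 (n : Int) 1).map (fun x => if P x then g x else 0)).sum
      = ((PySem.List.pyRange (max 0 lo) (min (n : Int) hi) 1).map g).sum := by
  induction n with
  | zero =>
    rw [pv_range_nil 0 ((0 : Nat) : Int) (by omega),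
        pv_range_nil (max 0 lo) (min ((0 : Nat) : Int) hi) (by omega)]
    simp
  | succ n ih =>
    rw [show ((n + 1 : Nat) : Int) = (n : Int) + 1 from by push_cast; ring,
        PySem.List.pyRange_one_succ_right (by omega)]
    simp only [List.map_append, List.sum_append, List.map_cons, List.map_nil,
      List.sum_cons, List.sum_nil, add_zero]
    by_cases h : lo ≤ (n : Int) ∧ (n : Int) < hi
    · rw [if_pos ((hP _).mpr h), ih,
          show min ((n : Int) + 1) hi = (n : Int) + 1 from by omega,
          show min ((n : Int)) hi = (n : Int) from by omega,
          PySem.List.pyRange_one_succ_right (show max 0 lo ≤ (n : Int) from by omega)]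
      simp
    · rw [if_neg (fun hx => h ((hP _).mp hx)), ih, add_zero]
      by_cases h2 : hi ≤ (n : Int)
      · rw [show min ((n : Int) + 1) hi = min ((n : Int)) hi from by omega]
      · rw [pv_range_nil _ _ (by omega), pv_range_nil _ _ (by omega)]

-- ===== VERDICT (by name: the statement is the Claim_ definition above) =====
theorem calc_sum_neighbors_spec : Claim_equal_calc_sum_neighbors := by
  intro board i_c j_c w h_ _ hpre
  obtain ⟨hwin, hcj, hci⟩ := hpre
  unfold Spec_calc_sum_neighbors
  dsimp only [calc_sum_neighbors, calc_sum_neighbors_alt]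
  simp only [PySem.List.foldl_add, pv_foldl_add_if, zero_add]
  rw [pv_scan_interval _ _ (j_c - 1) (min (j_c + 2) h_) (fun x => by omega) board.length]
  -- the clipped outer range is the window's row range (rows in range by Pre_)
  have hjlen : max 0 (j_c - 1) < min h_ (j_c + 2) →
      min h_ (j_c + 2) ≤ (board.length : Int) := by
    intro hlt
    have hm : min h_ (j_c + 2) - 1 ∈
        PySem.List.pyRange (max 0 (j_c - 1)) (min h_ (j_c + 2)) 1 := by
      rw [PySem.List.mem_pyRange_one]
      omega
    have := (hwin _ hm).1
    omega
  have hrangej : PySem.List.pyRange (max 0 (j_c - 1))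
        (min (board.length : Int) (min (j_c + 2) h_)) 1
      = PySem.List.pyRange (max 0 (j_c - 1)) (min h_ (j_c + 2)) 1 := by
    by_cases hlt : max 0 (j_c - 1) < min h_ (j_c + 2)
    · rw [show min (board.length : Int) (min (j_c + 2) h_) = min h_ (j_c + 2) from by
        have := hjlen hlt; omega]
    · rw [pv_range_nil _ _ (by omega), pv_range_nil _ _ (by omega)]
  rw [hrangej]
  -- per window row, the clipped inner range is the window's column range
  have hrows : ∀ j ∈ PySem.List.pyRange (max 0 (j_c - 1)) (min h_ (j_c + 2)) 1,
      ((PySem.List.pyRange (max 0 (i_c - 1)) (min w (i_c + 2)) 1).map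
        (fun i => pvAt board j i)).sum
      = ((PySem.List.pyRange (max 0 (i_c - 1))
            (min ((PySem.List.pyGetD board j ([] : List Int)).length : Int)
              (min (i_c + 2) w)) 1).map
          (fun i => PySem.List.pyGetD (PySem.List.pyGetD board j ([] : List Int)) i 0)).sum := by
    intro j hj
    have hrow := (hwin j hj).2
    have hilen : max 0 (i_c - 1) < min w (i_c + 2) →
        min w (i_c + 2) ≤ ((PySem.List.pyGetD board j ([] : List Int)).length : Int) := by
      intro hlt
      have hm : min w (i_c + 2) - 1 ∈
          PySem.List.pyRange (max 0 (i_c - 1)) (min w (i_c + 2)) 1 := by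
        rw [PySem.List.mem_pyRange_one]
        omega
      have := hrow _ hm
      omega
    have hrangei : PySem.List.pyRange (max 0 (i_c - 1))
          (min ((PySem.List.pyGetD board j ([] : List Int)).length : Int)
            (min (i_c + 2) w)) 1
        = PySem.List.pyRange (max 0 (i_c - 1)) (min w (i_c + 2)) 1 := by
      by_cases hlt : max 0 (i_c - 1) < min w (i_c + 2)
      · rw [show min ((PySem.List.pyGetD board j ([] : List Int)).length : Int)
              (min (i_c + 2) w) = min w (i_c + 2) from by
          have := hilen hlt; omega]
      · rw [pv_range_nil _ _ (by omega), pv_range_nil _ _ (by omega)]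
    rw [hrangei]
    dsimp only [pvAt]
  -- rewrite each inner scan to the interval form, then match row by row
  have hinner : ∀ j : Int,
      ((PySem.List.pyRange 0 ((PySem.List.pyGetD board j ([] : List Int)).length : Int) 1).map
        (fun i => if i_c - 1 ≤ i ∧ i ≤ i_c + 1 ∧ i < w
          then PySem.List.pyGetD (PySem.List.pyGetD board j ([] : List Int)) i 0 else 0)).sum
      = ((PySem.List.pyRange (max 0 (i_c - 1))
            (min ((PySem.List.pyGetD board j ([] : List Int)).length : Int)
              (min (i_c + 2) w)) 1).map
          (fun i => PySem.List.pyGetD (PySem.List.pyGetD board j ([] : List Int)) i 0)).sum := by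
    intro j
    exact pv_scan_interval _ _ (i_c - 1) (min (i_c + 2) w) (fun x => by omega) _
  simp only [hinner]
  rw [List.map_congr_left hrows]
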